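-- pv_equiv track=rewrite | github.com/rohitsurya7393/Resume-Tailor | core/docx_render.py | smart_break_positions
-- ===== SOURCE A (Python) =====
-- from typing import Dict, List, Iterable, Any, Tuple
--
-- def smart_break_positions(text: str, width: int) -> Iterable[int]:
--     """
--     Yield break positions so that lines are ~`width` chars and
--     we prefer breaking at a space at/left of the width.
--     """
--     i = 0
--     n = len(text)
--     while i + width < n:
--         # try to break on the last space up to width
--         cut = text.rfind(" ", i, i + width + 1)
--         if cut == -1 or cut <= i + int(width * 0.25):
--             # no nice space; hard break at width
--             cut = i + width
--         yield cut
--         i = cut + 1  # resume after break (skip the space)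
-- ===== SOURCE B (Python) =====
-- def smart_break_positions(text, width):
--     # One forward pass builds last[k] = index of the rightmost space at or
--     # before k (or -1); the loop then finds each cut in O(1) instead of rfind.
--     n = len(text)
--     last = []
--     prev = -1
--     for k, ch in enumerate(text):
--         if ch == ' ':
--             prev = k
--         last.append(prev)
--     i = 0
--     while i + width < n:
--         cut = last[i + width]
--         if cut < i or cut <= i + width // 4:
--             cut = i + width
--         yield cut
--         i = cut + 1
-- ===== Notes on version B (the rewrite author's own statement) =====
-- stated objective: alternative
-- what changed: B precomputes in one forward pass a table last[k] = rightmost space index <= k and finds each cut by an O(1) table lookup, replacing A's per-step backward rfind scan over the window; Pre_ requires 0 <= width since A (and B) never return for negative width (the loop diverges).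
import Mathlib
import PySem

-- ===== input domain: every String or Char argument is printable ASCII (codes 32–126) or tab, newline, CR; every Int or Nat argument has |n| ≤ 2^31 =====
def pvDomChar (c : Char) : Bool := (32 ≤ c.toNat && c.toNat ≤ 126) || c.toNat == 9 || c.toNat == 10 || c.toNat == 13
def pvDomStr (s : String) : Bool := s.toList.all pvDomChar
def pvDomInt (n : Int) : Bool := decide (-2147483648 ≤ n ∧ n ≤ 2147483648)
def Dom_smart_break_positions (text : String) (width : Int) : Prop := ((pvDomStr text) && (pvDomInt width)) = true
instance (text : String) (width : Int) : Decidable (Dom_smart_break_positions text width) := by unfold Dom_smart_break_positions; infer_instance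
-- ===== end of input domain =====

-- B replaces A's per-step backward rfind scan by a precomputed rightmost-space table looked up in O(1) (objective: alternative).
-- Pre_ requires 0 <= width: for negative width the Python loop of A never terminates (A returns on no such input).


-- ===== PORT A =====
-- text.rfind(" ", lo, hi): backward scan from hi-1 down to lo (bounds clamped to [0, n];
-- under Pre_ the start i is always ≥ 0, where this clamping is exactly Python's).
def pvRfindAux (cs : List Char) (lo : Nat) : Nat → Int
  | 0 => -1
  | h+1 =>
    if h < lo then -1
    else if cs.getD h '\x00' = ' ' then (h : Int)
    else pvRfindAux cs lo h

def pvRfindSpace (cs : List Char) (start stop : Int) : Int :=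
  pvRfindAux cs (max start 0).toNat (min stop (cs.length : Int)).toNat

-- the while loop; fuel only makes it total (each step advances i by ≥ 1 when 0 ≤ width,
-- so fuel = n+1 never runs out on inputs satisfying Pre_).
-- int(width * 0.25): for |width| ≤ 2^31 the float product width*0.25 is exact and int()
-- truncates toward zero, i.e. Int.tdiv width 4.
def pvLoopA (cs : List Char) (width : Int) : Int → Nat → List Int
  | _, 0 => []
  | i, fuel+1 =>
    if i + width < (cs.length : Int) then
      let cut0 := pvRfindSpace cs i (i + width + 1)
      let cut := if cut0 = -1 ∨ cut0 ≤ i + Int.tdiv width 4 then i + width else cut0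
      cut :: pvLoopA cs width (cut + 1) fuel
    else []

def smart_break_positions (text : String) (width : Int) : List Int :=
  pvLoopA text.toList width 0 (text.toList.length + 1)

-- ===== PORT B =====
-- forward pass: last[k] = index of the rightmost space at or before k, else -1
def pvLastAux (cs : List Char) (k prev : Int) : List Int :=
  match cs with
  | [] => []
  | c :: rest =>
    let p := if c = ' ' then k else prev
    p :: pvLastAux rest (k + 1) p

-- the while loop of B; last[i+width] is in range under Pre_ (0 ≤ i+width < n there)
def pvLoopB (last : List Int) (n width : Int) : Int → Nat → List Int
  | _, 0 => []
  | i, fuel+1 =>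
    if i + width < n then
      let cut0 := last.getD (i + width).toNat (-1)
      let cut := if cut0 < i ∨ cut0 ≤ i + PySem.Int.floordiv width 4 then i + width else cut0
      cut :: pvLoopB last n width (cut + 1) fuel
    else []

def smart_break_positions_alt (text : String) (width : Int) : List Int :=
  let cs := text.toList
  pvLoopB (pvLastAux cs 0 (-1)) (cs.length : Int) width 0 (cs.length + 1)

-- ===== PRECONDITION & SPEC =====
-- Pre_ excludes exactly width < 0, on which Python A's while loop never terminates (A returns no value).
def Pre_smart_break_positions (text : String) (width : Int) : Prop := 0 ≤ width
instance (text : String) (width : Int) : Decidable (Pre_smart_break_positions text width) := by unfold Pre_smart_break_positions; infer_instance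
def pvWitness_smart_break_positions : String × Int := ("hi there friend", 6)

def Spec_smart_break_positions (text : String) (width : Int) (out : List Int) : Prop := out = smart_break_positions_alt text width
instance (text : String) (width : Int) (out : List Int) : Decidable (Spec_smart_break_positions text width out) := by unfold Spec_smart_break_positions; infer_instance

-- ===== CLAIM (what is proved, stated in full; the proofs are below) =====
def Claim_equal_smart_break_positions : Prop := ∀ (text : String) (width : Int), Dom_smart_break_positions text width → Pre_smart_break_positions text width → Spec_smart_break_positions text width (smart_break_positions text width)

-- ===== LEMMAS AND PROOFS =====

-- proof-side reference: rightmost space index in [0, j] shifted by k, else prev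
def lSgP (cs : List Char) (k prev : Int) : Nat → Int
  | 0 => if cs.getD 0 '\x00' = ' ' then k else prev
  | j+1 => if cs.getD (j+1) '\x00' = ' ' then k + ((j : Int) + 1) else lSgP cs k prev j

lemma lSgP_le (cs : List Char) (j : Nat) : lSgP cs 0 (-1) j ≤ (j : Int) := by
  induction j with
  | zero => simp only [lSgP, Nat.cast_zero]; split <;> omega
  | succ j ih => simp only [lSgP]; split; · push_cast; omega
                 · exact le_trans ih (by push_cast; omega)

lemma lSgP_shift (cs : List Char) (c : Char) (k prev : Int) (j : Nat) :
    lSgP (c :: cs) k prev (j+1) = lSgP cs (k+1) (if c = ' ' then k else prev) j := by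
  induction j with
  | zero => simp [lSgP]
  | succ j ih =>
      simp only [lSgP, List.getD_cons_succ] at *
      split
      · push_cast; ring
      · exact ih

lemma lastAux_eq (cs : List Char) : ∀ (k prev : Int) (j : Nat), j < cs.length →
    (pvLastAux cs k prev).getD j (-1) = lSgP cs k prev j := by
  induction cs with
  | nil => intro k prev j hj; simp at hj
  | cons c cs ih =>
      intro k prev j hj
      cases j with
      | zero => simp [pvLastAux, lSgP]
      | succ j =>
          rw [lSgP_shift]
          simp only [pvLastAux, List.getD_cons_succ]
          exact ih (k+1) (if c = ' ' then k else prev) j (by simpa using hj)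

lemma rfindAux_eq (cs : List Char) (lo : Nat) : ∀ (h : Nat), h < cs.length →
    pvRfindAux cs lo (h+1) = if lSgP cs 0 (-1) h < (lo : Int) then -1 else lSgP cs 0 (-1) h := by
  intro h
  induction h with
  | zero =>
      intro _
      rw [pvRfindAux]
      simp only [lSgP, Nat.cast_zero, List.getD_eq_getElem?_getD]
      by_cases hsp : cs[0]?.getD '\x00' = ' ' <;>
        rcases Nat.eq_zero_or_pos lo with h0 | h0
      · subst h0; simp [hsp]
      · have h3 : (0:Int) < (lo:Int) := by exact_mod_cast h0
        simp only [hsp, if_true]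
        simp
      · subst h0; simp [hsp, pvRfindAux]
      · have h4 : (-1:Int) < (lo:Int) := by
          have := Int.natCast_nonneg lo; omega
        simp only [hsp, if_false]
        simp [h4, h0]
  | succ h ih =>
      intro hh
      have hh' : h < cs.length := by omega
      rw [pvRfindAux]
      have hls : lSgP cs 0 (-1) (h+1)
          = if cs[h+1]?.getD '\x00' = ' ' then (0:Int) + ((h:Int)+1) else lSgP cs 0 (-1) h := by
        simp [lSgP, List.getD_eq_getElem?_getD]
      rw [hls]
      simp only [List.getD_eq_getElem?_getD]
      by_cases hsp : cs[h+1]?.getD '\x00' = ' '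
      · by_cases hlo : h + 1 < lo
        · simp only [hsp, hlo, if_true]
          have h1 : (0:Int) + ((h:Int)+1) < (lo:Int) := by omega
          rw [if_pos h1]
        · have h1 : ¬ ((0:Int) + ((h:Int)+1) < (lo:Int)) := by push_cast at hlo ⊢; omega
          simp only [hsp, hlo, h1, if_true, if_false]
          push_cast; ring
      · simp only [hsp, if_false]
        by_cases hlo : h + 1 < lo
        · have hle := lSgP_le cs h
          have h1 : lSgP cs 0 (-1) h < (lo:Int) := by
            have h2 : ((h:Int)) < (lo:Int) := by push_cast at hlo ⊢; omega
            omega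
          simp [hlo, h1]
        · simp only [hlo, if_false]
          exact ih hh'

lemma cut_eq (cs : List Char) (width i : Int) (hw : 0 ≤ width) (hi : 0 ≤ i)
    (hlt : i + width < (cs.length : Int)) :
    (let cut0 := pvRfindSpace cs i (i + width + 1)
     if cut0 = -1 ∨ cut0 ≤ i + Int.tdiv width 4 then i + width else cut0)
    = (let cut0 := (pvLastAux cs 0 (-1)).getD (i + width).toNat (-1)
       if cut0 < i ∨ cut0 ≤ i + PySem.Int.floordiv width 4 then i + width else cut0) := by
  have hj : (i + width).toNat < cs.length := by omega
  have hjc : ((i + width).toNat : Int) = i + width := by omega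
  have hdiv : Int.tdiv width 4 = PySem.Int.floordiv width 4 := by
    rw [PySem.Int.floordiv_eq_ediv_of_pos (by omega)]
    exact Int.tdiv_eq_ediv_of_nonneg hw
  have hA : pvRfindSpace cs i (i + width + 1)
      = if lSgP cs 0 (-1) (i + width).toNat < (i.toNat : Int) then -1
        else lSgP cs 0 (-1) (i + width).toNat := by
    unfold pvRfindSpace
    have h1 : (max i 0).toNat = i.toNat := by omega
    have h2 : (min (i + width + 1) (cs.length : Int)).toNat = (i + width).toNat + 1 := by omega
    rw [h1, h2, rfindAux_eq cs i.toNat _ hj]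
  rw [lastAux_eq cs 0 (-1) _ hj]
  set s := lSgP cs 0 (-1) (i + width).toNat with hs
  have hit : (i.toNat : Int) = i := by omega
  simp only [hA, hit, hdiv]
  by_cases hlt2 : s < i
  · simp [hlt2]
  · have : ¬ s = -1 := by omega
    simp [hlt2, this]

lemma loops_eq (cs : List Char) (width : Int) (hw : 0 ≤ width) :
    ∀ (fuel : Nat) (i : Int), 0 ≤ i →
      pvLoopA cs width i fuel = pvLoopB (pvLastAux cs 0 (-1)) (cs.length : Int) width i fuel := by
  intro fuel
  induction fuel with
  | zero => intro i _; rfl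
  | succ fuel ih =>
      intro i hi
      simp only [pvLoopA, pvLoopB]
      by_cases hlt : i + width < (cs.length : Int)
      · simp only [hlt, if_true]
        have hcut := cut_eq cs width i hw hi hlt
        simp only at hcut
        rw [hcut]
        congr 1
        apply ih
        split
        · omega
        · rename_i hcond
          simp only [not_or, not_lt] at hcond
          omega
      · simp [hlt]

-- ===== VERDICT (by name: the statement is the Claim_ definition above) =====
theorem smart_break_positions_spec : Claim_equal_smart_break_positions := by
  intro text width _ hpre
  unfold Spec_smart_break_positions smart_break_positions smart_break_positions_alt
  exact loops_eq text.toList width hpre (text.toList.length + 1) 0 le_rfl
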